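-- pv_equiv track=rewrite | github.com/DeerInBlack/PARCS_bruteforce | parcs-bruteforce.py | split_charset
-- ===== SOURCE A (Python) =====
-- def split_charset(start_ids, end_ids, n):
--     """Split initial bounds into disjoint sub bounds"""
--     bounds = []
--     for rank in range(n):
--         temp_si, temp_ei = start_ids[:], end_ids[:]
--         i, rpp, rem = 0, 0, 0
--         temp_n = n
--         while i < len(start_ids) and rpp <= 0 <= rank:
--             r = temp_ei[i] - temp_si[i] + 1
--             rpp = r // temp_n
--             rem = r % temp_n - (rpp <= 0)
--             ps = temp_si[i] + rpp * rank + min(rem, rank)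
--             pe = ps if rpp <= 0 else ps + rpp + (rem > rank) - 1
--             temp_si[i], temp_ei[i] = ps, pe
--             temp_n -= rem
--             rank -= rem
--             i += 1
--         if rpp > 0 or rank <= 0:
--             bounds.append((temp_si, temp_ei))
--     return bounds
-- ===== SOURCE B (Python) =====
-- def split_charset(start_ids, end_ids, n):
--     """Split initial bounds into disjoint sub bounds.
--     Position-major single scan: a worklist of pending ranks walks the positions
--     once, computing the per-position stage parameters (rpp, rem) one time each.
--     Pinned prefixes are kept as shared cons-chains, materialized only on emit."""
--     bounds = []
--     active = [(j, None, None) for j in range(n)]  # (local rank, start-prefix chain, end-prefix chain)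
--     temp_n = n
--     i = 0
--     while i < len(start_ids) and active:
--         r = end_ids[i] - start_ids[i] + 1
--         rpp = r // temp_n
--         rem = r % temp_n - (rpp <= 0)
--         if rpp > 0:
--             bounds += [(_unchain(psx) + [start_ids[i] + rpp * j + min(rem, j)] + start_ids[i + 1:],
--                         _unchain(pex) + [start_ids[i] + rpp * j + min(rem, j) + rpp + (rem > j) - 1] + end_ids[i + 1:])
--                        for (j, psx, pex) in active]
--             active = []
--         else:
--             bounds += [(_unchain(psx) + [start_ids[i] + rpp * j + min(rem, j)] + start_ids[i + 1:],
--                         _unchain(pex) + [start_ids[i] + rpp * j + min(rem, j)] + end_ids[i + 1:])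
--                        for (j, psx, pex) in active if j < rem]
--             active = [(j - rem, (start_ids[i] + rpp * j + min(rem, j), psx),
--                        (start_ids[i] + rpp * j + min(rem, j), pex))
--                       for (j, psx, pex) in active if j >= rem]
--             temp_n -= rem
--         i += 1
--     bounds += [(_unchain(psx) + start_ids[i:], _unchain(pex) + end_ids[i:])
--                for (j, psx, pex) in active if j == 0]
--     return bounds
--
--
-- def _unchain(c):
--     """Materialize a cons-chain (newest first) into a list, oldest first."""
--     out = []
--     while c is not None:
--         out.append(c[0])
--         c = c[1]
--     out.reverse()
--     return out
-- ===== Notes on version B (the rewrite author's own statement) =====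
-- stated objective: alternative
-- what changed: A re-runs the whole per-position while loop (with fresh list copies) once per rank; B makes a single position-major scan carrying a worklist of pending ranks whose pinned prefixes are shared cons-chains, computing each position's stage parameters (rpp, rem) once and emitting finished bounds as ranks drop out of the worklist.
import Mathlib
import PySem

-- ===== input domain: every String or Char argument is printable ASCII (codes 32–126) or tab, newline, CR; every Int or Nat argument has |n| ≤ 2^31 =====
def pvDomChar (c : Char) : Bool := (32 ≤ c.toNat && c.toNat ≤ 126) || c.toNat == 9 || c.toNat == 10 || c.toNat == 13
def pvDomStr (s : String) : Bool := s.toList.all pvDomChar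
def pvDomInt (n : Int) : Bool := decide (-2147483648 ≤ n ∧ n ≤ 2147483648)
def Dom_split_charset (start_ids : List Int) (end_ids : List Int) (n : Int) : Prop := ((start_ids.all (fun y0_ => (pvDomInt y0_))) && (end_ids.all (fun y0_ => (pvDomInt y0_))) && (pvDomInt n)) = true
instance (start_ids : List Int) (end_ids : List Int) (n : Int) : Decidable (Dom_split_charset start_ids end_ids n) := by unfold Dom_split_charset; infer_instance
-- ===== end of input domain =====

-- B replaces A's rank-by-rank rescans with one position-major scan carrying a worklist of
-- pending ranks, computing each position's stage parameters once (objective: alternative).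

-- ===== PORT A =====
-- Per-rank while loop of A; list indexing uses getD (index i is a valid index under
-- Pre_split_charset; Python raises IndexError exactly where it would be out of range).
def loopA (si0 ei0 : List Int) (i : Nat) (rank rpp rem temp_n : Int)
    (tsi tei : List Int) : List Int × List Int × Int × Int :=
  if h : i < si0.length ∧ rpp ≤ 0 ∧ 0 ≤ rank then
    let r := tei.getD i 0 - tsi.getD i 0 + 1
    let rpp' := PySem.Int.floordiv r temp_n
    let rem' := PySem.Int.mod r temp_n - (if rpp' ≤ 0 then 1 else 0)
    let ps := tsi.getD i 0 + rpp' * rank + min rem' rank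
    let pe := if rpp' ≤ 0 then ps else ps + rpp' + (if rem' > rank then 1 else 0) - 1
    loopA si0 ei0 (i + 1) (rank - rem') rpp' rem' (temp_n - rem') (tsi.set i ps) (tei.set i pe)
  else (tsi, tei, rpp, rank)
termination_by si0.length - i
decreasing_by omega

def split_charset (start_ids : List Int) (end_ids : List Int) (n : Int) : List (List Int × List Int) :=
  (PySem.List.pyRange 0 n 1).foldl (fun bounds rank =>
    let t := loopA start_ids end_ids 0 rank 0 0 n start_ids end_ids
    if 0 < t.2.2.1 ∨ t.2.2.2 ≤ 0 then bounds ++ [(t.1, t.2.1)] else bounds) []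

-- ===== PORT B =====
-- Position-major scan of Source B: `active` is the worklist of (local rank, start-prefix chain,
-- end-prefix chain); Source B's cons-chains (newest first) are Lean lists built by cons, and
-- _unchain (materialize oldest-first) is List.reverse.
def stageB (si0 ei0 : List Int) (i : Nat) (temp_n : Int)
    (active : List (Int × List Int × List Int)) : List (List Int × List Int) :=
  if h : i < si0.length ∧ active ≠ [] then
    let r := ei0.getD i 0 - si0.getD i 0 + 1
    let rpp := PySem.Int.floordiv r temp_n
    let rem := PySem.Int.mod r temp_n - (if rpp ≤ 0 then 1 else 0)
    if 0 < rpp then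
      active.map (fun x =>
        (x.2.1.reverse ++ [si0.getD i 0 + rpp * x.1 + min rem x.1] ++ si0.drop (i + 1),
         x.2.2.reverse ++ [si0.getD i 0 + rpp * x.1 + min rem x.1 + rpp + (if rem > x.1 then 1 else 0) - 1] ++ ei0.drop (i + 1)))
    else
      active.filterMap (fun x => if x.1 < rem then
          some (x.2.1.reverse ++ [si0.getD i 0 + rpp * x.1 + min rem x.1] ++ si0.drop (i + 1),
                x.2.2.reverse ++ [si0.getD i 0 + rpp * x.1 + min rem x.1] ++ ei0.drop (i + 1)) else none)
      ++ stageB si0 ei0 (i + 1) (temp_n - rem)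
           (active.filterMap (fun x => if rem ≤ x.1 then
              some (x.1 - rem, (si0.getD i 0 + rpp * x.1 + min rem x.1) :: x.2.1,
                    (si0.getD i 0 + rpp * x.1 + min rem x.1) :: x.2.2) else none))
  else
    active.filterMap (fun x => if x.1 = 0 then some (x.2.1.reverse ++ si0.drop i, x.2.2.reverse ++ ei0.drop i) else none)
termination_by si0.length - i
decreasing_by omega

def split_charset_alt (start_ids : List Int) (end_ids : List Int) (n : Int) : List (List Int × List Int) :=
  stageB start_ids end_ids 0 n
    ((PySem.List.pyRange 0 n 1).map (fun j => (j, ([] : List Int), ([] : List Int))))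

-- ===== PRECONDITION & SPEC =====
-- A raises IndexError when n ≥ 1 and start_ids is longer than end_ids, unless its scan happens
-- to stop before reaching a missing end index; Pre_ excludes ALL such mismatched-length inputs
-- (the exact raise set is not closed-form), a malformed-input corner on which any returned
-- bounds pair lists of unequal lengths.
def Pre_split_charset (start_ids : List Int) (end_ids : List Int) (n : Int) : Prop :=
  n ≤ 0 ∨ start_ids.length ≤ end_ids.length
instance (start_ids : List Int) (end_ids : List Int) (n : Int) : Decidable (Pre_split_charset start_ids end_ids n) := by unfold Pre_split_charset; infer_instance

def pvWitness_split_charset : List Int × List Int × Int := ([0, 0], [3, 3], 3)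

def Spec_split_charset (start_ids : List Int) (end_ids : List Int) (n : Int) (out : List (List Int × List Int)) : Prop := out = split_charset_alt start_ids end_ids n
instance (start_ids : List Int) (end_ids : List Int) (n : Int) (out : List (List Int × List Int)) : Decidable (Spec_split_charset start_ids end_ids n out) := by unfold Spec_split_charset; infer_instance

-- ===== CLAIM (what is proved, stated in full; the proofs are below) =====
def Claim_equal_split_charset : Prop := ∀ (start_ids : List Int) (end_ids : List Int) (n : Int), Dom_split_charset start_ids end_ids n → Pre_split_charset start_ids end_ids n → Spec_split_charset start_ids end_ids n (split_charset start_ids end_ids n)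

-- ===== LEMMAS AND PROOFS =====

-- Common per-rank continuation: A's loop from position i, rewritten prefix-style.
def contA (si0 ei0 : List Int) (i : Nat) (temp_n j : Int) (psx pex : List Int) :
    Option (List Int × List Int) :=
  if h : i < si0.length ∧ 0 ≤ j then
    let r := ei0.getD i 0 - si0.getD i 0 + 1
    let rpp := PySem.Int.floordiv r temp_n
    let rem := PySem.Int.mod r temp_n - (if rpp ≤ 0 then 1 else 0)
    let ps := si0.getD i 0 + rpp * j + min rem j
    if 0 < rpp then
      some (psx.reverse ++ [ps] ++ si0.drop (i + 1),
            pex.reverse ++ [ps + rpp + (if rem > j then 1 else 0) - 1] ++ ei0.drop (i + 1))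
    else contA si0 ei0 (i + 1) (temp_n - rem) (j - rem) (ps :: psx) (ps :: pex)
  else if j ≤ 0 then some (psx.reverse ++ si0.drop i, pex.reverse ++ ei0.drop i) else none
termination_by si0.length - i
decreasing_by omega

lemma getD_prefix_drop (l t : List Int) (i : Nat) (hl : l.length = i) (hi : i < t.length) :
    (l ++ t.drop i).getD i 0 = t.getD i 0 := by
  rw [List.drop_eq_getElem_cons hi]
  simp [List.getD_eq_getElem?_getD, hl, hi]

lemma set_prefix_drop (l t : List Int) (i : Nat) (hl : l.length = i) (hi : i < t.length) (x : Int) :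
    (l ++ t.drop i).set i x = (l ++ [x]) ++ t.drop (i + 1) := by
  have h0 : (t.drop i).set 0 x = x :: t.drop (i + 1) := by
    rw [List.drop_eq_getElem_cons hi]; rfl
  rw [List.set_append, if_neg (by omega), hl, Nat.sub_self, h0]
  simp

lemma loopA_eq_contA (si0 ei0 : List Int) (hle : si0.length ≤ ei0.length) :
    ∀ i psx pex (j rpp rem temp_n : Int), psx.length = i → pex.length = i →
    rpp ≤ 0 →
    (let t := loopA si0 ei0 i j rpp rem temp_n (psx.reverse ++ si0.drop i) (pex.reverse ++ ei0.drop i)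
     if 0 < t.2.2.1 ∨ t.2.2.2 ≤ 0 then some (t.1, t.2.1) else none)
    = contA si0 ei0 i temp_n j psx pex := by
  intro i
  induction' hfuel : si0.length - i using Nat.strong_induction_on with fuel IH generalizing i
  intro psx pex j rpp rem temp_n hpsx hpex hrpp
  rw [loopA, contA]
  by_cases hcond : i < si0.length ∧ 0 ≤ j
  · have hiS : i < si0.length := hcond.1
    have hiE : i < ei0.length := lt_of_lt_of_le hiS hle
    rw [dif_pos ⟨hiS, hrpp, hcond.2⟩, dif_pos hcond]
    simp only []
    rw [getD_prefix_drop psx.reverse si0 i (by simp [hpsx]) hiS,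
        getD_prefix_drop pex.reverse ei0 i (by simp [hpex]) hiE]
    set r := ei0.getD i 0 - si0.getD i 0 + 1 with hr
    set rpp' := PySem.Int.floordiv r temp_n with hrpp'
    set rem' := PySem.Int.mod r temp_n - (if rpp' ≤ 0 then 1 else 0) with hrem'
    set ps := si0.getD i 0 + rpp' * j + min rem' j with hps
    by_cases hpos : 0 < rpp'
    · -- next while-check fails on rpp' > 0: one more unfolding of loopA, then exit
      rw [if_neg (by omega : ¬ rpp' ≤ 0), if_pos hpos]
      rw [set_prefix_drop psx.reverse si0 i (by simp [hpsx]) hiS,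
          set_prefix_drop pex.reverse ei0 i (by simp [hpex]) hiE]
      rw [loopA, dif_neg (by omega)]
      simp only []
      simp [hpos, List.append_assoc]
    · rw [if_neg hpos]
      have hps' : (if rpp' ≤ 0 then ps else ps + rpp' + (if rem' > j then 1 else 0) - 1) = ps := by
        rw [if_pos (by omega)]
      rw [hps']
      rw [set_prefix_drop psx.reverse si0 i (by simp [hpsx]) hiS,
          set_prefix_drop pex.reverse ei0 i (by simp [hpex]) hiE]
      rw [← List.reverse_cons, ← List.reverse_cons]
      exact IH (si0.length - (i + 1)) (by omega) (i + 1) rfl (ps :: psx) (ps :: pex)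
        (j - rem') rpp' rem' (temp_n - rem') (by simp [hpsx]) (by simp [hpex]) (by omega)
  · rw [dif_neg (by tauto), dif_neg hcond]
    by_cases hj : j ≤ 0
    · rw [if_pos (by omega : 0 < rpp ∨ j ≤ 0), if_pos hj]
    · rw [if_neg (by omega : ¬ (0 < rpp ∨ j ≤ 0)), if_neg hj]

-- a (≤-by-key)-pairwise list splits at a threshold into a strictly-below prefix and an at-least suffix
lemma pairwise_split_at (t : Int) :
    ∀ (l : List (Int × List Int × List Int)), l.Pairwise (fun a b => a.1 ≤ b.1) →
    ∃ l1 l2, l = l1 ++ l2 ∧ (∀ x ∈ l1, x.1 < t) ∧ (∀ x ∈ l2, t ≤ x.1) := by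
  intro l hl
  induction l with
  | nil => exact ⟨[], [], by simp⟩
  | cons a l ih =>
    rw [List.pairwise_cons] at hl
    by_cases ha : a.1 < t
    · obtain ⟨l1, l2, heq, h1, h2⟩ := ih hl.2
      exact ⟨a :: l1, l2, by simp [heq], by simpa [ha] using h1, h2⟩
    · refine ⟨[], a :: l, by simp, by simp, ?_⟩
      intro x hx
      rcases List.mem_cons.mp hx with h | h
      · subst h; omega
      · have := hl.1 x h; omega

lemma stageB_eq_filterMap (si0 ei0 : List Int) :
    ∀ i (temp_n : Int) (active : List (Int × List Int × List Int)),
    (∀ x ∈ active, 0 ≤ x.1) → active.Pairwise (fun a b => a.1 ≤ b.1) →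
    stageB si0 ei0 i temp_n active
      = active.filterMap (fun x => contA si0 ei0 i temp_n x.1 x.2.1 x.2.2) := by
  intro i
  induction' hfuel : si0.length - i using Nat.strong_induction_on with fuel IH generalizing i
  intro temp_n active hnn hpw
  rw [stageB]
  by_cases hact : active = []
  · subst hact
    rw [dif_neg (by simp)]
    simp
  by_cases hi : i < si0.length
  · rw [dif_pos ⟨hi, hact⟩]
    simp only []
    set r := ei0.getD i 0 - si0.getD i 0 + 1 with hr
    set rpp := PySem.Int.floordiv r temp_n with hrpp
    set rem := PySem.Int.mod r temp_n - (if rpp ≤ 0 then 1 else 0) with hrem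
    by_cases hpos : 0 < rpp
    · rw [if_pos hpos]
      rw [List.filterMap_congr (g := fun x => some
            (x.2.1.reverse ++ [si0.getD i 0 + rpp * x.1 + min rem x.1] ++ si0.drop (i + 1),
             x.2.2.reverse ++ [si0.getD i 0 + rpp * x.1 + min rem x.1 + rpp + (if rem > x.1 then 1 else 0) - 1] ++ ei0.drop (i + 1)))
          (fun x hx => by
            rw [contA, dif_pos ⟨hi, hnn x hx⟩]
            simp only []
            rw [← hr, ← hrpp, ← hrem, if_pos hpos])]
      simp
    · rw [if_neg hpos]
      obtain ⟨A1, A2, heq, h1, h2⟩ := pairwise_split_at rem active hpw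
      subst heq
      have hpwA2 : A2.Pairwise (fun a b => a.1 ≤ b.1) := (List.pairwise_append.mp hpw).2.1
      -- the three filterMaps over active split along A1 ++ A2
      rw [List.filterMap_append, List.filterMap_append, List.filterMap_append]
      have e1 : A1.filterMap (fun x => if x.1 < rem then
            some (x.2.1.reverse ++ [si0.getD i 0 + rpp * x.1 + min rem x.1] ++ si0.drop (i + 1),
                  x.2.2.reverse ++ [si0.getD i 0 + rpp * x.1 + min rem x.1] ++ ei0.drop (i + 1)) else none)
          = A1.filterMap (fun x => contA si0 ei0 i temp_n x.1 x.2.1 x.2.2) := by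
        apply List.filterMap_congr
        intro x hx
        rw [if_pos (h1 x hx)]
        rw [contA, dif_pos ⟨hi, hnn x (by simp [hx])⟩]
        simp only []
        rw [← hr, ← hrpp, ← hrem, if_neg hpos]
        rw [contA, dif_neg (by have := h1 x hx; omega), if_pos (by have := h1 x hx; omega)]
        simp [List.append_assoc]
      have e2 : A2.filterMap (fun x => if x.1 < rem then
            some (x.2.1.reverse ++ [si0.getD i 0 + rpp * x.1 + min rem x.1] ++ si0.drop (i + 1),
                  x.2.2.reverse ++ [si0.getD i 0 + rpp * x.1 + min rem x.1] ++ ei0.drop (i + 1)) else none)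
          = [] := by
        rw [List.filterMap_eq_nil_iff]
        intro x hx
        rw [if_neg (by have := h2 x hx; omega)]
      have e3 : A1.filterMap (fun x => if rem ≤ x.1 then
            some (x.1 - rem, (si0.getD i 0 + rpp * x.1 + min rem x.1) :: x.2.1,
                  (si0.getD i 0 + rpp * x.1 + min rem x.1) :: x.2.2) else none)
          = [] := by
        rw [List.filterMap_eq_nil_iff]
        intro x hx
        rw [if_neg (by have := h1 x hx; omega)]
      have e4 : A2.filterMap (fun x => if rem ≤ x.1 then
            some (x.1 - rem, (si0.getD i 0 + rpp * x.1 + min rem x.1) :: x.2.1,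
                  (si0.getD i 0 + rpp * x.1 + min rem x.1) :: x.2.2) else none)
          = A2.map (fun x => (x.1 - rem, (si0.getD i 0 + rpp * x.1 + min rem x.1) :: x.2.1,
                  (si0.getD i 0 + rpp * x.1 + min rem x.1) :: x.2.2)) := by
        rw [List.filterMap_congr (g := fun x => some (x.1 - rem,
              (si0.getD i 0 + rpp * x.1 + min rem x.1) :: x.2.1,
              (si0.getD i 0 + rpp * x.1 + min rem x.1) :: x.2.2))
            (fun x hx => by rw [if_pos (h2 x hx)])]
        simp
      rw [e1, e2, e3, e4, List.nil_append, List.append_nil]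
      have e5 : A2.filterMap (fun x => contA si0 ei0 i temp_n x.1 x.2.1 x.2.2)
          = (A2.map (fun x => (x.1 - rem, (si0.getD i 0 + rpp * x.1 + min rem x.1) :: x.2.1,
              (si0.getD i 0 + rpp * x.1 + min rem x.1) :: x.2.2))).filterMap
              (fun x => contA si0 ei0 (i + 1) (temp_n - rem) x.1 x.2.1 x.2.2) := by
        rw [List.filterMap_map]
        apply List.filterMap_congr
        intro x hx
        rw [contA, dif_pos ⟨hi, hnn x (by simp [hx])⟩]
        simp only []
        rw [← hr, ← hrpp, ← hrem, if_neg hpos]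
        rfl
      rw [e5]
      congr 1
      exact IH (si0.length - (i + 1)) (by omega) (i + 1) rfl (temp_n - rem) _
        (by intro x hx
            obtain ⟨y, hy, rfl⟩ := List.mem_map.mp hx
            have := h2 y hy; simpa using by omega)
        ((hpwA2.map _ (by intro a b hab; simpa using by omega)))
  · rw [dif_neg (by tauto)]
    apply List.filterMap_congr
    intro x hx
    rw [contA, dif_neg (by tauto)]
    have hx0 : 0 ≤ x.1 := hnn x hx
    by_cases hz : x.1 = 0
    · rw [if_pos hz, if_pos (by omega)]
    · rw [if_neg hz, if_neg (by omega)]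

lemma pyRange_one_nonneg (b x : Int) (hx : x ∈ PySem.List.pyRange 0 b 1) : 0 ≤ x :=
  ((PySem.List.mem_pyRange_one).mp hx).1

lemma pyRange_one_pairwise : ∀ (a b : Int), (PySem.List.pyRange a b 1).Pairwise (· ≤ ·) := by
  intro a b
  by_cases h : a < b
  · rw [PySem.List.pyRange_one_cons h]
    rw [List.pairwise_cons]
    constructor
    · intro y hy
      have := (PySem.List.mem_pyRange_one.mp hy).1; omega
    · have : (b - (a + 1)).toNat < (b - a).toNat := by omega
      exact pyRange_one_pairwise (a + 1) b
  · rw [PySem.List.pyRange_one_eq_nil (by omega)]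
    exact List.Pairwise.nil
termination_by a b => (b - a).toNat
decreasing_by omega

lemma foldl_ite_append (C : Int → Prop) [DecidablePred C]
    (f : Int → List Int × List Int) :
    ∀ (l : List Int) (acc : List (List Int × List Int)),
    l.foldl (fun b x => if C x then b ++ [f x] else b) acc
      = acc ++ l.filterMap (fun x => if C x then some (f x) else none) := by
  intro l
  induction l with
  | nil => simp
  | cons a l ih =>
    intro acc
    by_cases h : C a <;> simp [h, ih, List.append_assoc]

-- ===== VERDICT (by name: the statement is the Claim_ definition above) =====
theorem split_charset_spec : Claim_equal_split_charset := by
  intro start_ids end_ids n _hdom hpre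
  unfold Spec_split_charset split_charset split_charset_alt
  by_cases hn : n ≤ 0
  · rw [PySem.List.pyRange_one_eq_nil hn]
    rw [stageB]
    simp
  · have hle : start_ids.length ≤ end_ids.length := by
      rcases hpre with h | h
      · omega
      · exact h
    rw [stageB_eq_filterMap start_ids end_ids 0 n _
        (by intro x hx
            obtain ⟨y, hy, rfl⟩ := List.mem_map.mp hx
            simpa using pyRange_one_nonneg n y hy)
        ((pyRange_one_pairwise 0 n).map _ (by intro a b hab; simpa using hab))]
    rw [List.filterMap_map]
    rw [foldl_ite_append
      (fun rank => 0 < (loopA start_ids end_ids 0 rank 0 0 n start_ids end_ids).2.2.1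
        ∨ (loopA start_ids end_ids 0 rank 0 0 n start_ids end_ids).2.2.2 ≤ 0)
      (fun rank => ((loopA start_ids end_ids 0 rank 0 0 n start_ids end_ids).1,
        (loopA start_ids end_ids 0 rank 0 0 n start_ids end_ids).2.1))]
    rw [List.nil_append]
    apply List.filterMap_congr
    intro g _hg
    have := loopA_eq_contA start_ids end_ids hle 0 [] [] g 0 0 n rfl rfl le_rfl
    simpa using this
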